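-- pv_equiv track=rewrite | github.com/jacob-corletto/Stock-algo | rax.py | generate_knapsack_candidates
-- ===== SOURCE A (Python) =====
-- def generate_knapsack_candidates(sublists, capacity):
--
--   candidates = []
--
--   def generate_knapsack_candidates_helper(remaining_sublists, remaining_capacity, current_subset):
--
--     if remaining_capacity == 0:
--       candidates.append(current_subset)
--       return
--
--     for i in range(len(remaining_sublists)):
--       sublist = remaining_sublists[i]
--       if sublist[1] <= remaining_capacity:
--         # Add the sublist to the current_subset.
--         new_subset = current_subset + [sublist]
--
--         # Recursively generate all possible subsets of the remaining_sublists with the reduced capacity.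
--         generate_knapsack_candidates_helper(remaining_sublists[:i] + remaining_sublists[i + 1:], remaining_capacity - sublist[1], new_subset)
--
--   generate_knapsack_candidates_helper(sublists, capacity, [])
--
--   return candidates
-- ===== SOURCE B (Python) =====
-- def generate_knapsack_candidates(sublists, capacity):
--     candidates = []
--     stack = [(sublists, capacity, [])]
--     while stack:
--         rem, cap, cur = stack.pop()
--         if cap == 0:
--             candidates.append(cur)
--             continue
--         for i in reversed(range(len(rem))):
--             sub = rem[i]
--             if sub[1] <= cap:
--                 stack.append((rem[:i] + rem[i + 1:], cap - sub[1], cur + [sub]))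
--     return candidates
-- ===== Notes on version B (the rewrite author's own statement) =====
-- stated objective: alternative
-- what changed: A's nested recursive helper with a closed-over accumulator is replaced by an iterative DFS over an explicit LIFO stack of (remaining, capacity, subset) frames, pushing children in reverse index order to reproduce the recursion's pre-order output.
-- outside the precondition, e.g. on generate_knapsack_candidates([[5]], 3): A raises IndexError, B raises IndexError
import Mathlib
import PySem

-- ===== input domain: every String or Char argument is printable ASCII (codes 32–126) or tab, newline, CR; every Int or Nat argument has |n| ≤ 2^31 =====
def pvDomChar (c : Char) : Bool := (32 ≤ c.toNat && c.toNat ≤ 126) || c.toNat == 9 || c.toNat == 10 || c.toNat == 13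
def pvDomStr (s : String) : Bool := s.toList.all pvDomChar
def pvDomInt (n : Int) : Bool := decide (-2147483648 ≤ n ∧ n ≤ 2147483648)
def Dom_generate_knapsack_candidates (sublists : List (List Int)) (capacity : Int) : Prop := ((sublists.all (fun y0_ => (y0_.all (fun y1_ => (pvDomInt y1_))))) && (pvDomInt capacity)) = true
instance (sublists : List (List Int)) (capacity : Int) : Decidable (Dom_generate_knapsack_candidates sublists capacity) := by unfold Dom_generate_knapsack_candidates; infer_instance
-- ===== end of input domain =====

-- B replaces A's recursive helper by an explicit LIFO stack of frames with reverse-order pushes (same output, alternative decomposition, no speed claim).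

-- ===== PORT A =====
-- recursive helper of A; rem[:i] + rem[i+1:] is ported as take/drop (exact for 0 ≤ i < len),
-- sublist[1] as pyGetD (exact under Pre_, which guarantees index 1 is in range wherever A reads it)
def gkcHelper (rem : List (List Int)) (cap : Int) (cur : List (List Int)) : List (List (List Int)) :=
  if cap = 0 then [cur]
  else
    (List.range rem.length).attach.foldl
      (fun acc i =>
        if PySem.List.pyGetD (PySem.List.pyGetD rem (i.1 : Int) []) 1 0 ≤ cap then
          acc ++ gkcHelper (rem.take i.1 ++ rem.drop (i.1 + 1))
                  (cap - PySem.List.pyGetD (PySem.List.pyGetD rem (i.1 : Int) []) 1 0)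
                  (cur ++ [PySem.List.pyGetD rem (i.1 : Int) []])
        else acc)
      []
termination_by rem.length
decreasing_by
  have hi : i.1 < rem.length := List.mem_range.mp i.2
  simp only [List.length_append, List.length_take, List.length_drop]
  omega

def generate_knapsack_candidates (sublists : List (List Int)) (capacity : Int) : List (List (List Int)) :=
  gkcHelper sublists capacity []

-- ===== PORT B =====
-- a stack frame (remaining_sublists, remaining_capacity, current_subset)
def pvFrameW (f : List (List Int) × Int × List (List Int)) : Nat := Nat.factorial (f.1.length + 1)
def pvStackW (st : List (List (List Int) × Int × List (List Int))) : Nat := (st.map pvFrameW).sum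

-- termination measure bound for the reverse-order push loop (cited by runStack's decreasing_by)
theorem pvFoldW_le {c : Nat → Prop} [DecidablePred c]
    (g : Nat → List (List Int) × Int × List (List Int)) (w : Nat)
    (l : List Nat) (rest : List (List (List Int) × Int × List (List Int)))
    (hb : ∀ i ∈ l, pvFrameW (g i) ≤ w) :
    pvStackW (l.foldl (fun st i => if c i then g i :: st else st) rest)
      ≤ pvStackW rest + l.length * w := by
  induction l generalizing rest with
  | nil => simp
  | cons a l ih =>
    simp only [List.foldl_cons, List.length_cons]
    have ha := hb a (by simp)
    have hl : ∀ i ∈ l, pvFrameW (g i) ≤ w := fun i hi => hb i (by simp [hi])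
    have h4 : (l.length + 1) * w = l.length * w + w := Nat.succ_mul l.length w
    by_cases hc : c a
    · simp only [if_pos hc]
      have h2 := ih (rest := g a :: rest) hl
      have h3 : pvStackW (g a :: rest) = pvFrameW (g a) + pvStackW rest := by
        simp [pvStackW]
      omega
    · simp only [if_neg hc]
      have h2 := ih (rest := rest) hl
      omega

-- B: explicit stack, pop from the top, push candidate children in reverse index order
def runStack (st : List (List (List Int) × Int × List (List Int))) : List (List (List Int)) :=
  match st with
  | [] => []
  | (rem, cap, cur) :: rest =>
    if cap = 0 then cur :: runStack rest
    else
      runStack ((List.range rem.length).reverse.foldl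
        (fun stk (i : Nat) =>
          if PySem.List.pyGetD (PySem.List.pyGetD rem (i : Int) []) 1 0 ≤ cap then
            (rem.take i ++ rem.drop (i + 1),
             cap - PySem.List.pyGetD (PySem.List.pyGetD rem (i : Int) []) 1 0,
             cur ++ [PySem.List.pyGetD rem (i : Int) []]) :: stk
          else stk)
        rest)
termination_by pvStackW st
decreasing_by
  · simp only [pvStackW, List.map_cons, List.sum_cons, pvFrameW]
    have := Nat.factorial_pos (rem.length + 1)
    omega
  · have hb : ∀ i ∈ (List.range rem.length).reverse,
        pvFrameW ((rem.take i ++ rem.drop (i + 1),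
          cap - PySem.List.pyGetD (PySem.List.pyGetD rem (i : Int) []) 1 0,
          cur ++ [PySem.List.pyGetD rem (i : Int) []])) ≤ Nat.factorial rem.length := by
      intro i hi
      have : i < rem.length := List.mem_range.mp (List.mem_reverse.mp hi)
      simp only [pvFrameW, List.length_append, List.length_take, List.length_drop]
      have h1 : min i rem.length + (rem.length - (i + 1)) + 1 = rem.length := by omega
      rw [h1]
    have h := pvFoldW_le (c := fun i => PySem.List.pyGetD (PySem.List.pyGetD rem (i : Int) []) 1 0 ≤ cap)
      (g := fun i => (rem.take i ++ rem.drop (i + 1),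
          cap - PySem.List.pyGetD (PySem.List.pyGetD rem (i : Int) []) 1 0,
          cur ++ [PySem.List.pyGetD rem (i : Int) []]))
      (w := Nat.factorial rem.length) ((List.range rem.length).reverse) rest hb
    simp only [List.length_reverse, List.length_range] at h
    simp only [dite_eq_ite]
    have h2 : pvStackW ((rem, cap, cur) :: rest)
        = Nat.factorial (rem.length + 1) + pvStackW rest := by
      simp only [pvStackW, List.map_cons, List.sum_cons, pvFrameW]
    have h3 : Nat.factorial (rem.length + 1)
        = rem.length * Nat.factorial rem.length + Nat.factorial rem.length := by
      rw [Nat.factorial_succ, Nat.succ_mul]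
    have h4 := Nat.factorial_pos rem.length
    omega

def generate_knapsack_candidates_alt (sublists : List (List Int)) (capacity : Int) : List (List (List Int)) :=
  runStack [(sublists, capacity, [])]

-- ===== PRECONDITION & SPEC =====
-- Pre_ excludes exactly the inputs where Python A raises IndexError (capacity ≠ 0, a nonempty
-- sublists list containing a sublist of length < 2: A reads sublist[1] for every sublist).
def Pre_generate_knapsack_candidates (sublists : List (List Int)) (capacity : Int) : Prop :=
  capacity = 0 ∨ sublists = [] ∨ ∀ l ∈ sublists, 2 ≤ l.length
instance (sublists : List (List Int)) (capacity : Int) : Decidable (Pre_generate_knapsack_candidates sublists capacity) := by unfold Pre_generate_knapsack_candidates; infer_instance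

def pvWitness_generate_knapsack_candidates : List (List Int) × Int := ([[1, 2], [3, 1]], 3)

def Spec_generate_knapsack_candidates (sublists : List (List Int)) (capacity : Int) (out : List (List (List Int))) : Prop := out = generate_knapsack_candidates_alt sublists capacity
instance (sublists : List (List Int)) (capacity : Int) (out : List (List (List Int))) : Decidable (Spec_generate_knapsack_candidates sublists capacity out) := by unfold Spec_generate_knapsack_candidates; infer_instance

-- ===== CLAIM (what is proved, stated in full; the proofs are below) =====
def Claim_equal_generate_knapsack_candidates : Prop := ∀ (sublists : List (List Int)) (capacity : Int), Dom_generate_knapsack_candidates sublists capacity → Pre_generate_knapsack_candidates sublists capacity → Spec_generate_knapsack_candidates sublists capacity (generate_knapsack_candidates sublists capacity)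

-- ===== LEMMAS AND PROOFS =====

theorem foldl_if_append {α : Type} {β : Type} (c : α → Prop) [DecidablePred c] (h : α → List β) :
    ∀ (l : List α) (init : List β),
      l.foldl (fun acc x => if c x then acc ++ h x else acc) init
        = init ++ (l.map (fun x => if c x then h x else [])).flatten := by
  intro l
  induction l with
  | nil => simp
  | cons a l ih =>
    intro init
    simp only [List.foldl_cons, List.map_cons, List.flatten_cons]
    by_cases hc : c a
    · simp only [if_pos hc, ih, List.append_assoc]
    · simp only [if_neg hc, ih, List.nil_append]

def pvSemFrame (f : List (List Int) × Int × List (List Int)) : List (List (List Int)) :=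
  gkcHelper f.1 f.2.1 f.2.2

theorem gkcHelper_ne (rem : List (List Int)) (cap : Int) (cur : List (List Int)) (h : ¬ cap = 0) :
    gkcHelper rem cap cur =
      ((List.range rem.length).map (fun (i : Nat) =>
        if PySem.List.pyGetD (PySem.List.pyGetD rem (i : Int) []) 1 0 ≤ cap then
          gkcHelper (rem.take i ++ rem.drop (i + 1))
            (cap - PySem.List.pyGetD (PySem.List.pyGetD rem (i : Int) []) 1 0)
            (cur ++ [PySem.List.pyGetD rem (i : Int) []])
        else [])).flatten := by
  rw [gkcHelper, if_neg h]
  rw [foldl_if_append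
      (c := fun (i : {x // x ∈ List.range rem.length}) =>
        PySem.List.pyGetD (PySem.List.pyGetD rem (i.1 : Int) []) 1 0 ≤ cap)
      (h := fun (i : {x // x ∈ List.range rem.length}) =>
        gkcHelper (rem.take i.1 ++ rem.drop (i.1 + 1))
          (cap - PySem.List.pyGetD (PySem.List.pyGetD rem (i.1 : Int) []) 1 0)
          (cur ++ [PySem.List.pyGetD rem (i.1 : Int) []]))]
  simp only [List.nil_append]
  congr 1
  conv_rhs => rw [← List.attach_map_subtype_val (List.range rem.length)]
  rw [List.map_map]
  rfl

theorem foldl_push_flatten (rem : List (List Int)) (cap : Int) (cur : List (List Int)) :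
    ∀ (l : List Nat) (rest : List (List (List Int) × Int × List (List Int))),
      ((l.foldl (fun stk (i : Nat) =>
          if PySem.List.pyGetD (PySem.List.pyGetD rem (i : Int) []) 1 0 ≤ cap then
            (rem.take i ++ rem.drop (i + 1),
             cap - PySem.List.pyGetD (PySem.List.pyGetD rem (i : Int) []) 1 0,
             cur ++ [PySem.List.pyGetD rem (i : Int) []]) :: stk
          else stk) rest).map pvSemFrame).flatten
      = ((l.reverse.map (fun (i : Nat) =>
          if PySem.List.pyGetD (PySem.List.pyGetD rem (i : Int) []) 1 0 ≤ cap then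
            gkcHelper (rem.take i ++ rem.drop (i + 1))
              (cap - PySem.List.pyGetD (PySem.List.pyGetD rem (i : Int) []) 1 0)
              (cur ++ [PySem.List.pyGetD rem (i : Int) []])
          else [])).flatten) ++ (rest.map pvSemFrame).flatten := by
  intro l
  induction l with
  | nil => simp
  | cons a l ih =>
    intro rest
    simp only [List.foldl_cons, List.reverse_cons, List.map_append, List.flatten_append,
      List.map_cons, List.map_nil, List.flatten_cons, List.flatten_nil, List.append_nil]
    by_cases hc : PySem.List.pyGetD (PySem.List.pyGetD rem (a : Int) []) 1 0 ≤ cap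
    · simp only [if_pos hc, ih, List.map_cons, List.flatten_cons, pvSemFrame, List.append_assoc]
    · simp only [if_neg hc, ih, List.append_nil]

theorem runStack_eq (st : List (List (List Int) × Int × List (List Int))) :
    runStack st = (st.map pvSemFrame).flatten := by
  induction st using runStack.induct with
  | case1 => simp [runStack]
  | case2 rem cur rest ih =>
    rw [runStack, if_pos rfl, ih]
    simp only [List.map_cons, List.flatten_cons, pvSemFrame]
    rw [gkcHelper, if_pos rfl]
    rfl
  | case3 rem cap cur rest hcap ih =>
    rw [runStack, if_neg hcap]
    simp only [dite_eq_ite] at ih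
    rw [ih]
    rw [foldl_push_flatten rem cap cur ((List.range rem.length).reverse) rest]
    rw [List.reverse_reverse]
    simp only [List.map_cons, List.flatten_cons, pvSemFrame]
    rw [gkcHelper_ne rem cap cur hcap]

-- ===== VERDICT (by name: the statement is the Claim_ definition above) =====
theorem generate_knapsack_candidates_spec : Claim_equal_generate_knapsack_candidates := by
  intro sublists capacity _ _
  show generate_knapsack_candidates sublists capacity = generate_knapsack_candidates_alt sublists capacity
  rw [generate_knapsack_candidates_alt, runStack_eq]
  simp [pvSemFrame, generate_knapsack_candidates]
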